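-- pv_equiv track=rewrite | github.com/dhbw-ma-ppp/ppp-2024 | Exercises/AdrianErdmann/exercises_03AE.py | specialNumbers
-- ===== SOURCE A (Python) =====
-- def specialNumbers(lower_number, upper_number):
--     passed_numbers = []
--     for number in range(lower_number, upper_number):
--         i = 1
--         str_number = str(number)
--         char_number = [str_number[0], 1]
--         two_consecutive_chars = False
--         while i < len(str_number):
--             if char_number[0] == str_number[i]:
--                 char_number[1] = char_number[1] + 1
--                 if i == len(str_number) - 1 and char_number[1] == 2:
--                     two_consecutive_chars = True
--             elif char_number[0] < str_number[i]:
--                 if char_number[1] == 2: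
--                     two_consecutive_chars = True
--                 char_number = [str_number[i], 1]
--             else:
--                 break
--             i += 1
--         else:
--             if two_consecutive_chars:
--                 passed_numbers.append(number)
--     return passed_numbers
-- ===== SOURCE B (Python) =====
-- def _qualifies(s):
--     return all(a <= b for a, b in zip(s, s[1:])) and any(s.count(c) == 2 for c in s)
--
--
-- def specialNumbers(lower_number, upper_number):
--     return [n for n in range(lower_number, upper_number) if _qualifies(str(n))]
-- ===== Notes on version B (the rewrite author's own statement) =====
-- stated objective: simpler
-- what changed: The stateful while-loop that tracks the current run (char, count) with break/else and end-of-string flag logic is replaced by a declarative per-number test: adjacent characters non-decreasing AND some character occurs exactly twice (runs of equal characters are contiguous in a non-decreasing string, so a run of length 2 is exactly a character with count 2).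
import Mathlib
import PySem

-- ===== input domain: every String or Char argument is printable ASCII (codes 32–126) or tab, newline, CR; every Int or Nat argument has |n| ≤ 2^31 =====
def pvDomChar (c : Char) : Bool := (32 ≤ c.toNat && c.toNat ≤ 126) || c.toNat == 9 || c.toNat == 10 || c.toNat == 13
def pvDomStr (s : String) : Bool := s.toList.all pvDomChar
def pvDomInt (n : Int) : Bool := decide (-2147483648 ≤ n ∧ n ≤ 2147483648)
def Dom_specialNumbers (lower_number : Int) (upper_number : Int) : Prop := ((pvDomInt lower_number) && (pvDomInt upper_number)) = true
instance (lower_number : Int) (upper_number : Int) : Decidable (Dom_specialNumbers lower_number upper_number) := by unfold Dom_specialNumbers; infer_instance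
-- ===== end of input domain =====

-- B replaces A's stateful run-tracking while-loop (with break/else) by a declarative per-number
-- test: characters of str(n) non-decreasing AND some character occurs exactly twice; simpler.

-- ===== PORT A =====
-- A's while-loop: c/cnt = char_number, flag = two_consecutive_chars; the remaining chars are the
-- list argument.  'xs = []' is Python's 'i == len(str_number) - 1' (the current char is the last).
-- none = the 'break' branch was taken (the for-else then skips the append).
def aLoop (c : Char) (cnt : Int) (flag : Bool) : List Char → Option Bool
  | [] => some flag
  | x :: xs =>
    if c == x then
      let cnt' := cnt + 1
      let flag' := if xs = [] ∧ cnt' = 2 then true else flag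
      aLoop c cnt' flag' xs
    else if c < x then
      let flag' := if cnt = 2 then true else flag
      aLoop x 1 flag' xs
    else none

-- str(number) is never empty, so the [] case (Python's s[0] would raise there) is unreachable.
def aCheck : List Char → Bool
  | [] => false
  | c :: rest =>
    match aLoop c 1 false rest with
    | some flag => flag
    | none => false

def specialNumbers (lower_number : Int) (upper_number : Int) : List Int :=
  (PySem.List.pyRange lower_number upper_number 1).foldl
    (fun passed_numbers number =>
      if aCheck (PySem.Int.toChars number) then passed_numbers ++ [number] else passed_numbers)
    []

-- ===== PORT B =====
-- _qualifies: all(a <= b for a, b in zip(s, s[1:])) and any(s.count(c) == 2 for c in s)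
-- (Python's s.count(c) for a single character c is exactly List.count on the char list)
def qualifies (s : List Char) : Bool :=
  ((s.zip s.tail).all fun p => p.1 ≤ p.2) && (s.any fun c => s.count c == 2)

def specialNumbers_alt (lower_number : Int) (upper_number : Int) : List Int :=
  (PySem.List.pyRange lower_number upper_number 1).filter
    (fun n => qualifies (PySem.Int.toChars n))

-- ===== PRECONDITION & SPEC =====
def Spec_specialNumbers (lower_number : Int) (upper_number : Int) (out : List Int) : Prop := out = specialNumbers_alt lower_number upper_number
instance (lower_number : Int) (upper_number : Int) (out : List Int) : Decidable (Spec_specialNumbers lower_number upper_number out) := by unfold Spec_specialNumbers; infer_instance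

-- ===== CLAIM (what is proved, stated in full; the proofs are below) =====
def Claim_equal_specialNumbers : Prop := ∀ (lower_number : Int) (upper_number : Int), Dom_specialNumbers lower_number upper_number → Spec_specialNumbers lower_number upper_number (specialNumbers lower_number upper_number)

-- ===== LEMMAS AND PROOFS =====

-- non-decreasing adjacent chars
def nonDec : List Char → Bool
  | x :: y :: t => (x ≤ y) && nonDec (y :: t)
  | _ => true

-- mirrors aLoop's flag updates: "scanning on from run (c, cnt), some run ends with length exactly 2"
def hasRun2 (c : Char) (cnt : Int) : List Char → Bool
  | [] => false
  | x :: xs =>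
    if c = x then ((decide (xs = [] ∧ cnt + 1 = 2)) || hasRun2 c (cnt + 1) xs)
    else (decide (cnt = 2) || hasRun2 x 1 xs)

lemma count_cons_ne (a b : Char) (l : List Char) (h : b ≠ a) : (a :: l).count b = l.count b := by
  simp [Ne.symm h]

lemma count_cons_self (a : Char) (l : List Char) : (a :: l).count a = l.count a + 1 := by
  simp

lemma iteTrue_or (P : Prop) [Decidable P] (f b : Bool) :
    ((if P then true else f) || b) = (f || (decide P || b)) := by
  by_cases h : P <;> simp [h]

lemma zip_all_eq_nonDec : ∀ s : List Char, ((s.zip s.tail).all fun p => p.1 ≤ p.2) = nonDec s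
  | [] => rfl
  | [_] => rfl
  | x :: y :: t => by
    have := zip_all_eq_nonDec (y :: t)
    simp only [List.tail, List.zip_cons_cons, List.all_cons, nonDec] at *
    rw [this]

lemma aLoop_eq : ∀ (xs : List Char) (c : Char) (cnt : Int) (flag : Bool),
    aLoop c cnt flag xs = if nonDec (c :: xs) then some (flag || hasRun2 c cnt xs) else none
  | [], c, cnt, flag => by simp [aLoop, nonDec, hasRun2]
  | x :: xs, c, cnt, flag => by
    rw [aLoop]
    by_cases hcx : c = x
    · subst hcx
      rw [aLoop_eq xs c (cnt + 1)]
      have hnd : nonDec (c :: c :: xs) = nonDec (c :: xs) := by simp [nonDec]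
      rw [hnd]
      by_cases hn : nonDec (c :: xs) = true
      · simp only [hn, beq_self_eq_true, if_true]
        rw [iteTrue_or]
        congr 1
        rw [hasRun2, if_pos rfl]
      · simp [hn]
    · have hbeq : (c == x) = false := by simp [hcx]
      rw [hbeq]
      simp only [Bool.false_eq_true, if_false]
      by_cases hlt : c < x
      · rw [if_pos hlt, aLoop_eq xs x 1]
        have hnd : nonDec (c :: x :: xs) = nonDec (x :: xs) := by
          simp [nonDec, le_of_lt hlt]
        rw [hnd, hasRun2, if_neg hcx]
        by_cases hn : nonDec (x :: xs) = true
        · simp only [hn, if_true]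
          rw [iteTrue_or]
        · simp [hn]
      · rw [if_neg hlt]
        have hc : ¬ (c ≤ x) := fun h => (lt_or_eq_of_le h).elim hlt hcx
        have : nonDec (c :: x :: xs) = false := by simp [nonDec, hc]
        simp [this]

lemma nonDec_head_le : ∀ (x : Char) (xs : List Char), nonDec (x :: xs) = true → ∀ d ∈ xs, x ≤ d
  | _, [], _, d, hd => by cases hd
  | x, y :: t, h, d, hd => by
    simp only [nonDec, Bool.and_eq_true, decide_eq_true_eq] at h
    rcases List.mem_cons.mp hd with rfl | hd'
    · exact h.1
    · exact le_trans h.1 (nonDec_head_le y t h.2 d hd')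

-- counting characterisation: in a non-decreasing tail, hasRun2 says "some run has length exactly 2"
lemma hasRun2_iff : ∀ (xs : List Char) (c : Char) (cnt : Int),
    nonDec (c :: xs) = true →
    (hasRun2 c cnt xs = true ↔
      ((xs ≠ [] ∧ cnt + (xs.count c : Int) = 2) ∨ ∃ d ∈ xs, c < d ∧ (xs.count d : Int) = 2))
  | [], c, cnt, _ => by simp [hasRun2]
  | x :: xs, c, cnt, hnd => by
    by_cases hcx : c = x
    · subst hcx
      have hnd' : nonDec (c :: xs) = true := by
        have h := hnd
        rw [nonDec, Bool.and_eq_true] at h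
        exact h.2
      rw [hasRun2, if_pos rfl]
      have IH := hasRun2_iff xs c (cnt + 1) hnd'
      constructor
      · intro h
        rcases Bool.or_eq_true_iff.mp h with hend | hr
        · rcases of_decide_eq_true hend with ⟨hx, h2⟩
          subst hx
          left
          refine ⟨List.cons_ne_nil _ _, ?_⟩
          rw [count_cons_self, List.count_nil]
          push_cast
          omega
        · rcases IH.mp hr with ⟨hne, hc⟩ | ⟨d, hd, hlt, hc2⟩
          · left
            refine ⟨List.cons_ne_nil _ _, ?_⟩
            rw [count_cons_self]
            push_cast
            omega
          · right
            refine ⟨d, List.mem_cons_of_mem _ hd, hlt, ?_⟩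
            rw [count_cons_ne _ _ _ (ne_of_gt hlt)]
            exact hc2
      · intro h
        apply Bool.or_eq_true_iff.mpr
        rcases h with ⟨_, hc⟩ | ⟨d, hd, hlt, hc2⟩
        · rw [count_cons_self] at hc
          push_cast at hc
          by_cases hx : xs = []
          · left
            subst hx
            rw [decide_eq_true_eq]
            refine ⟨rfl, ?_⟩
            simp at hc
            omega
          · right
            exact IH.mpr (Or.inl ⟨hx, by omega⟩)
        · have hdc : d ≠ c := ne_of_gt hlt
          rcases List.mem_cons.mp hd with rfl | hd'
          · exact absurd rfl hdc
          · right
            apply IH.mpr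
            right
            refine ⟨d, hd', hlt, ?_⟩
            rw [count_cons_ne _ _ _ hdc] at hc2
            exact hc2
    · have hle : c ≤ x := by
        simp only [nonDec, Bool.and_eq_true, decide_eq_true_eq] at hnd
        exact hnd.1
      have hlt : c < x := lt_of_le_of_ne hle hcx
      have hnd' : nonDec (x :: xs) = true := by
        simp only [nonDec, Bool.and_eq_true] at hnd
        exact hnd.2
      have hxle : ∀ d ∈ xs, x ≤ d := nonDec_head_le x xs hnd'
      have hcnot : c ∉ x :: xs := by
        intro hmem
        rcases List.mem_cons.mp hmem with rfl | h'
        · exact hcx rfl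
        · exact absurd (hxle c h') (not_le_of_gt hlt)
      have hcount0 : (x :: xs).count c = 0 := List.count_eq_zero.mpr hcnot
      rw [hasRun2, if_neg hcx]
      have IH := hasRun2_iff xs x 1 hnd'
      constructor
      · intro h
        rcases Bool.or_eq_true_iff.mp h with h2 | hr
        · left
          refine ⟨List.cons_ne_nil _ _, ?_⟩
          rw [hcount0]
          have : cnt = 2 := of_decide_eq_true h2
          omega
        · rcases IH.mp hr with ⟨_, hc⟩ | ⟨d, hd, hxd, hc2⟩
          · right
            refine ⟨x, List.mem_cons_self, hlt, ?_⟩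
            rw [count_cons_self]
            push_cast
            omega
          · right
            refine ⟨d, List.mem_cons_of_mem _ hd, lt_trans hlt hxd, ?_⟩
            rw [count_cons_ne _ _ _ (ne_of_gt hxd)]
            exact hc2
      · intro h
        apply Bool.or_eq_true_iff.mpr
        rcases h with ⟨_, hc⟩ | ⟨d, hd, hcd, hc2⟩
        · rw [hcount0] at hc
          have : cnt = 2 := by push_cast at hc; omega
          simp [this]
        · right
          apply IH.mpr
          rcases List.mem_cons.mp hd with rfl | hd'
          · left
            rw [count_cons_self] at hc2
            push_cast at hc2
            have h1 : xs.count d = 1 := by omega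
            have hne : xs ≠ [] := by
              intro hx
              rw [hx] at h1
              simp at h1
            exact ⟨hne, by omega⟩
          · by_cases hdx : d = x
            · subst hdx
              left
              rw [count_cons_self] at hc2
              push_cast at hc2
              have h1 : xs.count d = 1 := by omega
              have hne : xs ≠ [] := by
                intro hx
                rw [hx] at h1
                simp at h1
              exact ⟨hne, by omega⟩
            · right
              refine ⟨d, hd', lt_of_le_of_ne (hxle d hd') (Ne.symm hdx), ?_⟩
              rw [count_cons_ne _ _ _ hdx] at hc2
              exact hc2

lemma check_eq : ∀ s : List Char, aCheck s = qualifies s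
  | [] => by simp [aCheck, qualifies]
  | c :: rest => by
    rw [aCheck, aLoop_eq, qualifies, zip_all_eq_nonDec]
    by_cases hn : nonDec (c :: rest) = true
    · simp only [hn, if_true, Bool.true_and, Bool.false_or]
      have key := hasRun2_iff rest c 1 hn
      have hany : ((c :: rest).any fun d => (c :: rest).count d == 2) = true ↔
          ((rest ≠ [] ∧ (1 : Int) + (rest.count c : Int) = 2) ∨
            ∃ d ∈ rest, c < d ∧ (rest.count d : Int) = 2) := by
        rw [List.any_eq_true]
        constructor
        · rintro ⟨d, hd, hc2⟩
          rw [beq_iff_eq] at hc2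
          by_cases hdc : d = c
          · subst hdc
            rw [count_cons_self] at hc2
            have h1 : rest.count d = 1 := by omega
            left
            refine ⟨?_, by rw [h1]; norm_num⟩
            intro hx
            rw [hx] at h1
            simp at h1
          · rcases List.mem_cons.mp hd with rfl | hd'
            · exact absurd rfl hdc
            · right
              refine ⟨d, hd', lt_of_le_of_ne (nonDec_head_le c rest hn d hd') (Ne.symm hdc), ?_⟩
              rw [count_cons_ne _ _ _ hdc] at hc2
              exact_mod_cast hc2
        · rintro (⟨_, h1⟩ | ⟨d, hd, hcd, hc2⟩)
          · refine ⟨c, List.mem_cons_self, ?_⟩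
            have hc1 : rest.count c = 1 := by omega
            rw [beq_iff_eq, count_cons_self, hc1]
          · refine ⟨d, List.mem_cons_of_mem _ hd, ?_⟩
            have h2 : rest.count d = 2 := by exact_mod_cast hc2
            rw [beq_iff_eq, count_cons_ne _ _ _ (ne_of_gt hcd), h2]
      rcases Bool.eq_false_or_eq_true (hasRun2 c 1 rest) with hT | hF
      · rw [hT]
        symm
        rw [hany]
        exact key.mp hT
      · rw [hF]
        symm
        rw [← Bool.not_eq_true, hany]
        intro hcontra
        exact absurd (key.mpr hcontra) (by rw [hF]; simp)
    · simp [hn]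

-- ===== VERDICT (by name: the statement is the Claim_ definition above) =====
theorem specialNumbers_spec : Claim_equal_specialNumbers := by
  intro l u _
  unfold Spec_specialNumbers specialNumbers specialNumbers_alt
  rw [PySem.List.foldl_append_if_eq_filter]
  simp only [check_eq]
  simp
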